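-- pv_equiv track=rewrite | github.com/Activision/cwl-data | tools/helper.py | find_modes_n_maps
-- ===== SOURCE A (Python) =====
-- def find_modes_n_maps(rows):
--     """Helper to find all the modes and maps played in the tournament."""
--     modes_n_maps = {}
--     for row in rows:
--         if row['mode'] not in modes_n_maps:
--             modes_n_maps[row['mode']] = []
--         if row['map'] not in modes_n_maps[row['mode']]:
--             modes_n_maps[row['mode']].append(row['map'])
--     return modes_n_maps
-- ===== SOURCE B (Python) =====
-- def find_modes_n_maps(rows):
--     """Helper to find all the modes and maps played in the tournament."""
--     modes = list(dict.fromkeys(row['mode'] for row in rows))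
--     return {mode: list(dict.fromkeys(row['map'] for row in rows if row['mode'] == mode))
--             for mode in modes}
-- ===== Notes on version B (the rewrite author's own statement) =====
-- stated objective: alternative
-- what changed: B replaces A's single interleaved build-a-dict-with-membership-tests pass by two staged comprehensions: first the ordered list of distinct modes, then for each mode a filter of all rows deduplicated with dict.fromkeys (no mutable dict is ever built).
import Mathlib
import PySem

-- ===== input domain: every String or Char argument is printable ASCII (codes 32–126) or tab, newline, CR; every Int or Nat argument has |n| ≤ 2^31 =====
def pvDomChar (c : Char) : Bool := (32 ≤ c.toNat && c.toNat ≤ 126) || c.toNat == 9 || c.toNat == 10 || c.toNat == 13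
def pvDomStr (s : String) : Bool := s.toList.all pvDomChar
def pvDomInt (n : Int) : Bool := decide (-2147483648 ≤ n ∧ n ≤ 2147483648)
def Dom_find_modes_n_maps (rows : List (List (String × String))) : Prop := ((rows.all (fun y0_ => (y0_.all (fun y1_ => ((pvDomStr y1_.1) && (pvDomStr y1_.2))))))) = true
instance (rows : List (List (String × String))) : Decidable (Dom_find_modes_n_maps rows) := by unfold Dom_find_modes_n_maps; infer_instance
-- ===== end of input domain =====

-- B builds the ordered list of distinct modes first, then for each mode filters all rows and
-- dedups the maps — two staged comprehensions instead of A's single interleaved dict-building pass.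

-- row['mode'] / row['map'] (both sources read these; under Pre_ the keys are present)
def modeOf (row : List (String × String)) : String := (PySem.Dict.mk row).getD "mode" ""
def mapOf (row : List (String × String)) : String := (PySem.Dict.mk row).getD "map" ""

-- ===== PORT A =====
-- one iteration of A's loop body
def stepA_find (d : PySem.Dict String (List String)) (row : List (String × String)) : PySem.Dict String (List String) :=
  let d1 := if d.contains (modeOf row) then d else d.insert (modeOf row) []
  if mapOf row ∈ d1.getD (modeOf row) [] then d1
  else d1.insert (modeOf row) (d1.getD (modeOf row) [] ++ [mapOf row])

def find_modes_n_maps (rows : List (List (String × String))) : List (String × List String) :=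
  (rows.foldl stepA_find PySem.Dict.empty).items

-- ===== PORT B =====
-- modes = list(dict.fromkeys(row['mode'] for row in rows))
-- {mode: list(dict.fromkeys(row['map'] for row in rows if row['mode'] == mode)) for mode in modes}
def find_modes_n_maps_alt (rows : List (List (String × String))) : List (String × List String) :=
  let modes := PySem.List.dedup (rows.map modeOf)
  modes.map (fun mode =>
    (mode, PySem.List.dedup ((rows.filter (fun row => modeOf row == mode)).map mapOf)))

-- ===== PRECONDITION & SPEC =====
-- Pre_ excludes rows missing the 'mode' or 'map' key, on which A (and B) raise KeyError.
def Pre_find_modes_n_maps (rows : List (List (String × String))) : Prop :=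
  ∀ row ∈ rows, (PySem.Dict.mk row).contains "mode" = true ∧ (PySem.Dict.mk row).contains "map" = true
instance (rows : List (List (String × String))) : Decidable (Pre_find_modes_n_maps rows) := by unfold Pre_find_modes_n_maps; infer_instance
def pvWitness_find_modes_n_maps : (List (List (String × String))) :=
  [[("mode", "Hardpoint"), ("map", "Ardennes Forest")], [("mode", "Hardpoint"), ("map", "Ardennes Forest")]]

def Spec_find_modes_n_maps (rows : List (List (String × String))) (out : List (String × List String)) : Prop := out = find_modes_n_maps_alt rows
instance (rows : List (List (String × String))) (out : List (String × List String)) : Decidable (Spec_find_modes_n_maps rows out) := by unfold Spec_find_modes_n_maps; infer_instance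

-- ===== CLAIM =====
def Claim_equal_find_modes_n_maps : Prop := ∀ (rows : List (List (String × String))), Dom_find_modes_n_maps rows → Pre_find_modes_n_maps rows → Spec_find_modes_n_maps rows (find_modes_n_maps rows)

-- ===== LEMMAS AND PROOFS =====

-- the value B associates to a mode already seen in `rows`
def mapsFor (rows : List (List (String × String))) (m : String) : List String :=
  (rows.filter (fun row => modeOf row == m)).map mapOf

def entryFor (rows : List (List (String × String))) (m : String) : String × List String :=
  (m, PySem.List.dedup (mapsFor rows m))

lemma alt_eq (rows : List (List (String × String))) :
    find_modes_n_maps_alt rows = (PySem.List.dedup (rows.map modeOf)).map (entryFor rows) := rfl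

lemma dedup_append_of_mem {xs : List String} {v : String} (h : v ∈ xs) :
    PySem.List.dedup (xs ++ [v]) = PySem.List.dedup xs := by
  rw [PySem.List.dedup_eq_ofList, PySem.List.dedup_eq_ofList, PySem.Set.ofList_append_singleton,
    PySem.Set.add_of_mem ((PySem.Set.mem_ofList xs v).2 h)]

lemma dedup_append_of_not_mem {xs : List String} {v : String} (h : v ∉ xs) :
    PySem.List.dedup (xs ++ [v]) = PySem.List.dedup xs ++ [v] := by
  rw [PySem.List.dedup_eq_ofList, PySem.List.dedup_eq_ofList, PySem.Set.ofList_append_singleton,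
    PySem.Set.add_of_not_mem (fun hm => h ((PySem.Set.mem_ofList xs v).1 hm))]

lemma mapsFor_append (rows : List (List (String × String))) (row : List (String × String)) (m : String) :
    mapsFor (rows ++ [row]) m = mapsFor rows m ++ (if modeOf row == m then [mapOf row] else []) := by
  simp only [mapsFor, List.filter_append, List.map_append]
  by_cases h : modeOf row == m <;> simp [List.filter, h]

lemma mapsFor_eq_nil {rows : List (List (String × String))} {m : String}
    (h : m ∉ rows.map modeOf) : mapsFor rows m = [] := by
  simp only [mapsFor, List.map_eq_nil_iff, List.filter_eq_nil_iff]
  intro r hr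
  simp only [beq_iff_eq]
  exact fun he => h (he ▸ List.mem_map_of_mem hr)

lemma keys_of_items {d : PySem.Dict String (List String)} {l : List (String × List String)}
    (h : d.items = l) : d.keys = l.map Prod.fst := by
  simp only [PySem.Dict.keys, h]

lemma entryFor_append_ne (rows : List (List (String × String))) (row : List (String × String))
    (m' : String) (hne : modeOf row ≠ m') :
    entryFor (rows ++ [row]) m' = entryFor rows m' := by
  have hb : (modeOf row == m') = false := by simpa using hne
  simp [entryFor, mapsFor_append, hb]

lemma entryFor_append_self (rows : List (List (String × String))) (row : List (String × String)) :
    entryFor (rows ++ [row]) (modeOf row)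
      = (modeOf row, PySem.List.dedup (mapsFor rows (modeOf row) ++ [mapOf row])) := by
  simp [entryFor, mapsFor_append]

-- one loop iteration of A preserves "items = B's table for the rows consumed so far"
lemma step_main (rows : List (List (String × String))) (row : List (String × String))
    (d : PySem.Dict String (List String)) (h : d.items = find_modes_n_maps_alt rows) :
    (stepA_find d row).items = find_modes_n_maps_alt (rows ++ [row]) := by
  have hkeys : d.keys = PySem.List.dedup (rows.map modeOf) := by
    rw [keys_of_items (h.trans (alt_eq rows)), List.map_map]
    have : (Prod.fst ∘ entryFor rows) = id := by funext x; rfl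
    rw [this, List.map_id]
  have hnd : d.keys.Nodup := hkeys ▸ PySem.List.nodup_dedup _
  have halt' : find_modes_n_maps_alt (rows ++ [row])
      = (PySem.List.dedup (rows.map modeOf ++ [modeOf row])).map (entryFor (rows ++ [row])) := by
    rw [alt_eq, List.map_append, List.map_cons, List.map_nil]
  by_cases hin : modeOf row ∈ rows.map modeOf
  · -- mode already present
    have hcont : d.contains (modeOf row) = true := by
      rw [PySem.Dict.contains_eq_decide_mem_keys, hkeys]
      simp [PySem.Set.mem_ofList, hin]
    have hmem : (modeOf row, PySem.List.dedup (mapsFor rows (modeOf row))) ∈ d.items := by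
      rw [h, alt_eq]
      exact List.mem_map_of_mem ((PySem.List.mem_dedup _ _).2 hin)
    have hgetD : d.getD (modeOf row) [] = PySem.List.dedup (mapsFor rows (modeOf row)) :=
      PySem.Dict.getD_of_mem_items d hmem hnd []
    have hmodes : PySem.List.dedup (rows.map modeOf ++ [modeOf row])
        = PySem.List.dedup (rows.map modeOf) := dedup_append_of_mem hin
    by_cases hvin : mapOf row ∈ mapsFor rows (modeOf row)
    · -- duplicate map: A leaves d unchanged; B's dedup swallows the appended duplicate
      have hA : stepA_find d row = d := by
        simp only [stepA_find, hcont, if_true, hgetD]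
        rw [if_pos ((PySem.List.mem_dedup _ _).2 hvin)]
      rw [hA, h, halt', hmodes, alt_eq]
      refine (List.map_congr_left ?_).symm
      intro m' hm'
      by_cases hne : modeOf row = m'
      · subst hne
        rw [entryFor_append_self, entryFor, dedup_append_of_mem hvin]
      · exact entryFor_append_ne rows row m' hne
    · -- new map for this mode: both append it
      have hA : stepA_find d row
          = d.insert (modeOf row) (PySem.List.dedup (mapsFor rows (modeOf row)) ++ [mapOf row]) := by
        simp only [stepA_find, hcont, if_true, hgetD]
        rw [if_neg (fun hc => hvin ((PySem.List.mem_dedup _ _).1 hc))]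
      rw [hA, PySem.Dict.items_insert_of_contains d _ hcont, h, alt_eq, List.map_map,
        halt', hmodes]
      refine List.map_congr_left ?_
      intro m' hm'
      by_cases hne : modeOf row = m'
      · subst hne
        have hb : ((entryFor rows (modeOf row)).1 == modeOf row) = true := by
          simp [entryFor]
        simp only [Function.comp, hb, if_true]
        rw [entryFor_append_self, dedup_append_of_not_mem hvin]
      · have hb : ((entryFor rows m').1 == modeOf row) = false := by
          simpa [entryFor] using fun he => hne he.symm
        simp only [Function.comp, hb, Bool.false_eq_true, if_false]
        exact (entryFor_append_ne rows row m' hne).symm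
  · -- fresh mode: a new entry is appended at the end on both sides
    have hcont : d.contains (modeOf row) = false := by
      rw [PySem.Dict.contains_eq_decide_mem_keys, hkeys]
      simp [PySem.Set.mem_ofList, hin]
    have hA : stepA_find d row = d.insert (modeOf row) [mapOf row] := by
      simp only [stepA_find, hcont, Bool.false_eq_true, if_false]
      simp [PySem.Dict.getD_insert_self, PySem.Dict.insert_insert_self]
    have hmodes : PySem.List.dedup (rows.map modeOf ++ [modeOf row])
        = PySem.List.dedup (rows.map modeOf) ++ [modeOf row] :=
      dedup_append_of_not_mem hin
    rw [hA, PySem.Dict.items_insert_of_not_contains d _ hcont, h, halt', hmodes,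
      List.map_append, alt_eq]
    congr 1
    · refine (List.map_congr_left ?_).symm
      intro m' hm'
      have hne : modeOf row ≠ m' := fun he => hin (he ▸ (PySem.List.mem_dedup _ _).1 hm')
      exact entryFor_append_ne rows row m' hne
    · rw [List.map_cons, List.map_nil, entryFor_append_self, mapsFor_eq_nil hin]
      rfl

lemma foldl_main (rows : List (List (String × String))) :
    (rows.foldl stepA_find PySem.Dict.empty).items = find_modes_n_maps_alt rows := by
  induction rows using List.reverseRecOn with
  | nil => rfl
  | append_singleton rest row ih =>
      rw [List.foldl_append, List.foldl_cons, List.foldl_nil]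
      exact step_main rest row _ ih

-- ===== VERDICT =====
theorem find_modes_n_maps_spec : Claim_equal_find_modes_n_maps := by
  intro rows _ _
  exact foldl_main rows
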